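-- pv_equiv track=rewrite | github.com/WooHyunKing/CodingTest_study | DFS_BFS/hackerRank_count_luck.py | countLuck
-- ===== SOURCE A (Python) =====
-- def countLuck(matrix, k):
--
--     row = len(matrix)
--     col = len(matrix[0])
--     nx = [-1,1,0,0]
--     ny = [0,0,-1,1]
--     start_x, start_y = 0, 0
--
--     count = 0
--
--     graph = []
--     for i in range(row):
--         graph.append(list(matrix[i]))
--
--     for i in range(row):
--         for j in range(col):
--             if graph[i][j] == 'M':
--                 start_x, start_y = i, j
--
--     # Write your code here
--     def dfs(area, x, y):
--         # visited[x][y] = True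
--
--         if area[x][y] == '*':
--             return True
--
--         direct_count = 0
--
--         for i in range(4):
--             temp_x = x + nx[i]
--             temp_y = y + ny[i]
--
--             if temp_x >=0 and temp_x < row and temp_y >=0 and temp_y < col:
--                 if area[temp_x][temp_y] == '.' or area[temp_x][temp_y] == '*':
--                     direct_count += 1
--
--         if direct_count > 1:
--             area[x][y] = '1'
--         else:
--             area[x][y] = '0'
--
--         for i in range(4):
--             temp_x = x + nx[i]
--             temp_y = y + ny[i]
--
--             if temp_x >=0 and temp_x < row and temp_y >=0 and temp_y < col:
--                 if area[temp_x][temp_y] == '.' or area[temp_x][temp_y] == '*':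
--                      if dfs(area,temp_x,temp_y):
--                         return True
--         area[x][y] = '.'
--
--         return False
--
--     dfs(graph,start_x,start_y)
--
--     for i in range(row):
--         for j in range(col):
--             if graph[i][j] == '1':
--                 count += 1
--
--     if count == k:
--         return "Impressed"
--     else:
--         return "Oops!"
-- ===== SOURCE B (Python) =====
-- def countLuck(matrix, k):
--     # Iterative explicit-stack DFS instead of A's recursion; same marking discipline.
--     rows, cols = len(matrix), len(matrix[0])
--     grid = [list(r) for r in matrix]
--     moves = [(-1, 0), (1, 0), (0, -1), (0, 1)]
--
--     hits = [(i, j) for i in range(rows) for j in range(cols) if grid[i][j] == 'M']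
--     sx, sy = hits[-1] if hits else (0, 0)
--
--     def openc(x, y):
--         return 0 <= x < rows and 0 <= y < cols and grid[x][y] in ('.', '*')
--
--     def enter(x, y):
--         # True iff (x, y) is the goal; otherwise mark it '1'/'0' by its open degree.
--         if grid[x][y] == '*':
--             return True
--         deg = sum(openc(x + dx, y + dy) for dx, dy in moves)
--         grid[x][y] = '1' if deg > 1 else '0'
--         return False
--
--     if not enter(sx, sy):
--         stack = [(sx, sy, list(moves))]
--         while stack:
--             x, y, rem = stack[-1]
--             if not rem:
--                 grid[x][y] = '.'
--                 stack.pop()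
--                 continue
--             dx, dy = rem.pop(0)
--             if openc(x + dx, y + dy):
--                 if enter(x + dx, y + dy):
--                     break
--                 stack.append((x + dx, y + dy, list(moves)))
--
--     count = sum(row[:cols].count('1') for row in grid)
--     return "Impressed" if count == k else "Oops!"
-- ===== Notes on version B (the rewrite author's own statement) =====
-- stated objective: alternative
-- what changed: A's recursive backtracking dfs is replaced by an iterative explicit-stack DFS (a while loop over (x, y, remaining-moves) frames) with the same mark-on-entry / reset-on-backtrack discipline; the start cell is found via a comprehension's last hit instead of a double loop with a running variable, and the '1'-cells are counted with a per-row sum instead of nested index loops.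
import Mathlib
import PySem

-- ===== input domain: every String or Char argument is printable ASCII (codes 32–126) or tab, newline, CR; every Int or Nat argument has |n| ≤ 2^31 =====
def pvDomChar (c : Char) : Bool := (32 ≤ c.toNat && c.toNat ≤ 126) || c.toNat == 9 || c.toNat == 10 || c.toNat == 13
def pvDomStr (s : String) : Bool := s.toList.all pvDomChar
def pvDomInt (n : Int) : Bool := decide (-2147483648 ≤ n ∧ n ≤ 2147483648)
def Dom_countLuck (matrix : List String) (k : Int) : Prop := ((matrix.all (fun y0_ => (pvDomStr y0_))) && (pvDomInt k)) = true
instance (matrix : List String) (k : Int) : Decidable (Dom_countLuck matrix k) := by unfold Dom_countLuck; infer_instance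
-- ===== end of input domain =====

-- B replaces A's recursive backtracking DFS by an explicit-stack iterative DFS with the
-- same mark-on-entry / reset-on-backtrack discipline (objective: alternative decomposition).
-- Both ports use a fuel counter only as a totality guard; on inputs satisfying Pre_ the fuel
-- provably never runs out.

-- ===== PORT A =====
-- shared grid primitives (Python list-of-lists indexing/assignment on in-range indices)
def pvGet (g : List (List Char)) (x y : Int) : Char :=
  (g.getD x.toNat []).getD y.toNat ' '

def pvSet (g : List (List Char)) (x y : Int) (c : Char) : List (List Char) :=
  g.set x.toNat ((g.getD x.toNat []).set y.toNat c)

-- Python guard: bounds check followed by "cell is '.' or '*'"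
def pvCanGo (row col : Int) (g : List (List Char)) (x y : Int) : Bool :=
  (decide (0 ≤ x) && decide (x < row) && decide (0 ≤ y) && decide (y < col)) &&
  (pvGet g x y == '.' || pvGet g x y == '*')

def pvNx : List Int := [-1, 1, 0, 0]
def pvNy : List Int := [0, 0, -1, 1]

-- grid left by a search result (the mutated list in Python)
def resGrid (o : Option (Bool × List (List Char))) (g0 : List (List Char)) : List (List Char) :=
  match o with
  | some (_, g') => g'
  | none => g0

-- A's direct_count loop over i in range(4)
def dfsCountA (row col : Int) (g : List (List Char)) (x y : Int) : Int :=
  [0, 1, 2, 3].foldl (fun acc (i : Nat) =>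
    if pvCanGo row col g (x + pvNx.getD i 0) (y + pvNy.getD i 0) then acc + 1 else acc) 0

-- A's second for-loop over i in range(4) (with early return), recursion over the remaining indices;
-- the recursive dfs call is the parameter `dfs`
def loopGen (row col : Int) (dfs : List (List Char) → Int → Int → Option (Bool × List (List Char)))
    (g : List (List Char)) (x y : Int) (is : List Nat) : Option (Bool × List (List Char)) :=
  match is with
  | [] => some (false, pvSet g x y '.')
  | i :: is' =>
    if pvCanGo row col g (x + pvNx.getD i 0) (y + pvNy.getD i 0) then
      match dfs g (x + pvNx.getD i 0) (y + pvNy.getD i 0) with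
      | none => none
      | some (true, g') => some (true, g')
      | some (false, g') => loopGen row col dfs g' x y is'
    else loopGen row col dfs g x y is'

-- A's recursive dfs; fuel is only a totality guard (none = out of fuel, never reached from countLuck)
def dfsA (row col : Int) (f : Nat) (g : List (List Char)) (x y : Int) :
    Option (Bool × List (List Char)) :=
  match f with
  | 0 => none
  | Nat.succ f' =>
    if pvGet g x y == '*' then some (true, g)
    else
      loopGen row col (fun g' tx ty => dfsA row col f' g' tx ty)
        (pvSet g x y (if dfsCountA row col g x y > 1 then '1' else '0')) x y [0, 1, 2, 3]

def countLuck (matrix : List String) (k : Int) : String :=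
  let row : Int := matrix.length
  let col : Int := (matrix.headD "").length
  let graph : List (List Char) := matrix.map String.toList
  let start : Int × Int :=
    (List.range matrix.length).foldl (fun s (i : Nat) =>
      (List.range col.toNat).foldl (fun s (j : Nat) =>
        if pvGet graph (i : Int) (j : Int) == 'M' then ((i : Int), (j : Int)) else s) s) (0, 0)
  let fuel : Nat := (graph.map List.length).sum + 2
  let g2 : List (List Char) := resGrid (dfsA row col fuel graph start.1 start.2) graph
  let count : Int :=
    (List.range matrix.length).foldl (fun c (i : Nat) =>
      (List.range col.toNat).foldl (fun c (j : Nat) =>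
        if pvGet g2 (i : Int) (j : Int) == '1' then c + 1 else c) c) 0
  if count = k then "Impressed" else "Oops!"

-- ===== PORT B =====
def pvMoves : List (Int × Int) := [(-1, 0), (1, 0), (0, -1), (0, 1)]

-- Source B: deg = sum(openc(x+dx, y+dy) for dx, dy in moves)
def degB (row col : Int) (g : List (List Char)) (x y : Int) : Int :=
  (pvMoves.map (fun d => if pvCanGo row col g (x + d.1) (y + d.2) then (1 : Int) else 0)).sum

-- Source B: enter(x, y) — goal test, else mark by open degree; returns (goal?, new grid)
def enterB (row col : Int) (g : List (List Char)) (x y : Int) : Bool × List (List Char) :=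
  if pvGet g x y == '*' then (true, g)
  else (false, pvSet g x y (if degB row col g x y > 1 then '1' else '0'))

-- Source B: the while loop over the explicit stack of (x, y, remaining moves) frames;
-- fuel is only a totality guard (none = out of fuel, never reached from countLuck_alt)
def machB (row col : Int) (f : Nat) (g : List (List Char))
    (st : List (Int × Int × List (Int × Int))) : Option (Bool × List (List Char)) :=
  match f with
  | 0 => none
  | Nat.succ f' =>
    match st with
    | [] => some (false, g)
    | (x, y, []) :: rest => machB row col f' (pvSet g x y '.') rest
    | (x, y, d :: rem) :: rest =>
      if pvCanGo row col g (x + d.1) (y + d.2) then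
        match enterB row col g (x + d.1) (y + d.2) with
        | (true, g') => some (true, g')
        | (false, g') => machB row col f' g' ((x + d.1, y + d.2, pvMoves) :: (x, y, rem) :: rest)
      else machB row col f' g ((x, y, rem) :: rest)

-- fuel bound for the machine (totality guard only; closed form so it evaluates fast)
def dval : Nat → Nat
  | 0 => 0
  | f + 1 => 4 * dval f + 5

def stepBound (f n : Nat) : Nat := n * (dval f + 1) + 1

def countLuck_alt (matrix : List String) (k : Int) : String :=
  let rows : Int := matrix.length
  let cols : Int := (matrix.headD "").length
  let grid : List (List Char) := matrix.map String.toList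
  let hits : List (Int × Int) :=
    ((List.range matrix.length).flatMap (fun (i : Nat) =>
      (List.range cols.toNat).map (fun (j : Nat) => ((i : Int), (j : Int))))).filter
      (fun p => pvGet grid p.1 p.2 == 'M')
  let start : Int × Int := hits.getLastD ((0 : Int), (0 : Int))
  let fuel : Nat := stepBound ((grid.map List.length).sum + 1) 4 + 1
  let g2 : List (List Char) :=
    if (enterB rows cols grid start.1 start.2).1 then grid
    else
      resGrid (machB rows cols fuel (enterB rows cols grid start.1 start.2).2
        [(start.1, start.2, pvMoves)]) (enterB rows cols grid start.1 start.2).2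
  let count : Int := (g2.map (fun r => (((r.take cols.toNat).count '1' : Nat) : Int))).sum
  if count = k then "Impressed" else "Oops!"

-- ===== PRECONDITION & SPEC =====
-- Pre_ excludes exactly the inputs where Python A raises IndexError: an empty matrix, an
-- empty first row, or a row shorter than the first row (A indexes every row up to len(matrix[0])).
def Pre_countLuck (matrix : List String) (k : Int) : Prop :=
  matrix ≠ [] ∧ 0 < (matrix.headD "").length ∧
    ∀ s ∈ matrix, (matrix.headD "").length ≤ s.length

instance (matrix : List String) (k : Int) : Decidable (Pre_countLuck matrix k) := by
  unfold Pre_countLuck; infer_instance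

def pvWitness_countLuck : List String × Int := (["M.", ".*"], 2)

def Spec_countLuck (matrix : List String) (k : Int) (out : String) : Prop := out = countLuck_alt matrix k
instance (matrix : List String) (k : Int) (out : String) : Decidable (Spec_countLuck matrix k out) := by unfold Spec_countLuck; infer_instance

-- ===== CLAIM (what is proved, stated in full; the proofs are below) =====
def Claim_equal_countLuck : Prop := ∀ (matrix : List String) (k : Int), Dom_countLuck matrix k → Pre_countLuck matrix k → Spec_countLuck matrix k (countLuck matrix k)

-- ===== LEMMAS AND PROOFS =====

-- ---- small list lemmas ----
theorem list_set_getD_self {α : Type} (l : List α) (n : Nat) (d : α) :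
    l.set n (l.getD n d) = l := by
  induction l generalizing n with
  | nil => rfl
  | cons a t ih =>
    cases n with
    | zero => simp [List.getD]
    | succ m => simp [List.set, List.getD] at ih ⊢; exact ih m

theorem mapLen_set (g : List (List Char)) (n : Nat) (r : List Char)
    (h : r.length = (g.getD n []).length) :
    (g.set n r).map List.length = g.map List.length := by
  induction g generalizing n with
  | nil => rfl
  | cons a t ih =>
    cases n with
    | zero => simp [List.getD] at h; simp [List.set, h]
    | succ m =>
      have h' : r.length = (t.getD m []).length := by simpa [List.getD] using h
      show (a :: t.set m r).map List.length = (a :: t).map List.length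
      simp only [List.map_cons]
      exact congrArg _ (ih m h')

theorem pvSet_mapLen (g : List (List Char)) (x y : Int) (c : Char) :
    (pvSet g x y c).map List.length = g.map List.length := by
  unfold pvSet
  exact mapLen_set g x.toNat _ (by simp)

theorem list_set_ge {α : Type} (l : List α) (n : Nat) (a : α) (h : l.length ≤ n) :
    l.set n a = l := by
  induction l generalizing n with
  | nil => rfl
  | cons b t ih =>
    cases n with
    | zero => simp at h
    | succ m => simp at h; simp [List.set, ih m h]

theorem list_getD_set_self {α : Type} (l : List α) (n : Nat) (a d : α) (h : n < l.length) :
    (l.set n a).getD n d = a := by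
  induction l generalizing n with
  | nil => simp at h
  | cons b t ih =>
    cases n with
    | zero => rfl
    | succ m => simp at h; simp only [List.set, List.getD_cons_succ]; exact ih m h

theorem pvSet_pvSet (g : List (List Char)) (x y : Int) (c c' : Char) :
    pvSet (pvSet g x y c) x y c' = pvSet g x y c' := by
  unfold pvSet
  by_cases hn : x.toNat < g.length
  · rw [list_getD_set_self g x.toNat _ [] hn, List.set_set, List.set_set]
  · have h1 : g.length ≤ x.toNat := Nat.le_of_not_lt hn
    rw [list_set_ge g x.toNat _ h1, list_set_ge g x.toNat _ h1]

theorem pvSet_get_self (g : List (List Char)) (x y : Int) (c : Char)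
    (h : pvGet g x y = c) : pvSet g x y c = g := by
  unfold pvSet
  unfold pvGet at h
  rw [← h, list_set_getD_self, list_set_getD_self]

-- ---- dots (count of '.' cells) ----
def dots (g : List (List Char)) : Nat := (g.map (fun r => r.count '.')).sum

theorem count_set_le (r : List Char) (m : Nat) (c : Char) (hc : c ≠ '.') :
    (r.set m c).count '.' ≤ r.count '.' := by
  induction r generalizing m with
  | nil => simp
  | cons a t ih =>
    cases m with
    | zero => simp [List.set, List.count_cons, hc]
    | succ m' => simp [List.set, List.count_cons]; have := ih m'; omega

theorem count_set_lt (r : List Char) (m : Nat) (c : Char)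
    (h : r.getD m ' ' = '.') (hc : c ≠ '.') :
    (r.set m c).count '.' < r.count '.' := by
  induction r generalizing m with
  | nil => simp [List.getD] at h
  | cons a t ih =>
    cases m with
    | zero =>
      simp [List.getD] at h
      simp [List.set, hc, h]
    | succ m' =>
      simp [List.getD] at h
      simp [List.set, List.count_cons]
      have := ih m' h; omega

theorem dots_pvSet_le (g : List (List Char)) (x y : Int) (c : Char) (hc : c ≠ '.') :
    dots (pvSet g x y c) ≤ dots g := by
  unfold pvSet
  generalize x.toNat = n
  induction g generalizing n with
  | nil => simp
  | cons a t ih =>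
    cases n with
    | zero => simp [dots, List.set, List.getD]; exact count_set_le a y.toNat c hc
    | succ m => simp [dots, List.set, List.getD] at ih ⊢; exact ih m

theorem dots_pvSet_lt (g : List (List Char)) (x y : Int) (c : Char)
    (h : pvGet g x y = '.') (hc : c ≠ '.') :
    dots (pvSet g x y c) < dots g := by
  unfold pvSet
  unfold pvGet at h
  generalize hx : x.toNat = n
  rw [hx] at h
  clear hx
  induction g generalizing n with
  | nil => simp [List.getD] at h
  | cons a t ih =>
    cases n with
    | zero =>
      simp [List.getD] at h
      simp [dots, List.set, List.getD]
      exact count_set_lt a y.toNat c h hc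
    | succ m =>
      simp [List.getD] at h ih
      simp [dots, List.set, List.getD]
      have := ih m h
      simp [dots] at this
      omega

theorem dots_le_total (g : List (List Char)) : dots g ≤ (g.map List.length).sum := by
  induction g with
  | nil => simp [dots]
  | cons a t ih =>
    simp [dots] at ih ⊢
    have := List.count_le_length (l := a) (a := '.')
    omega

theorem pvCanGo_open (row col : Int) (g : List (List Char)) (x y : Int)
    (h : pvCanGo row col g x y = true) : pvGet g x y = '.' ∨ pvGet g x y = '*' := by
  unfold pvCanGo at h
  simp at h
  rcases h with ⟨-, h⟩
  exact h

-- ---- backtracking restores the grid ----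
theorem restore_loop (row col : Int)
    (dfs : List (List Char) → Int → Int → Option (Bool × List (List Char)))
    (Hdfs : ∀ g x y g', (pvGet g x y = '.' ∨ pvGet g x y = '*') →
      dfs g x y = some (false, g') → g' = g) :
    ∀ (is : List Nat) (g : List (List Char)) (x y : Int) (g' : List (List Char)),
      loopGen row col dfs g x y is = some (false, g') → g' = pvSet g x y '.' := by
  intro is
  induction is with
  | nil => intro g x y g' h; simp [loopGen] at h; exact h.symm
  | cons i is' ih =>
    intro g x y g' h
    simp only [loopGen] at h
    by_cases hc : pvCanGo row col g (x + pvNx.getD i 0) (y + pvNy.getD i 0) = true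
    · rw [if_pos hc] at h
      rcases hdfs : dfs g (x + pvNx.getD i 0) (y + pvNy.getD i 0) with _ | ⟨b1, g1⟩
      · rw [hdfs] at h; exact absurd h (by simp)
      · rw [hdfs] at h
        cases b1 with
        | true => exact absurd h (by simp)
        | false =>
          have hg1 : g1 = g := Hdfs _ _ _ _ (pvCanGo_open _ _ _ _ _ hc) hdfs
          simp only [hg1] at h
          exact ih _ _ _ _ h
    · rw [if_neg hc] at h
      exact ih _ _ _ _ h

theorem restore_dfs (row col : Int) :
    ∀ (f : Nat) (g : List (List Char)) (x y : Int) (g' : List (List Char)),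
      (pvGet g x y = '.' ∨ pvGet g x y = '*') →
      dfsA row col f g x y = some (false, g') → g' = g := by
  intro f
  induction f with
  | zero => intro g x y g' _ h; simp [dfsA] at h
  | succ f' ih =>
    intro g x y g' hd h
    simp only [dfsA] at h
    by_cases hs : pvGet g x y = '*'
    · simp [hs] at h
    · rw [if_neg (by simp [hs])] at h
      have hdot : pvGet g x y = '.' := by tauto
      have := restore_loop row col _ ih _ _ _ _ _ h
      rw [this, pvSet_pvSet, pvSet_get_self g x y '.' hdot]

-- ---- enough fuel: dfsA never returns none ----
theorem nd_loop (row col : Int) (f : Nat)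
    (dfs : List (List Char) → Int → Int → Option (Bool × List (List Char)))
    (H1 : ∀ g x y, (pvGet g x y = '.' ∨ pvGet g x y = '*') → dots g + 1 ≤ f →
      dfs g x y ≠ none)
    (H2 : ∀ g x y g', (pvGet g x y = '.' ∨ pvGet g x y = '*') →
      dfs g x y = some (false, g') → g' = g) :
    ∀ (is : List Nat) (g : List (List Char)) (x y : Int), dots g + 1 ≤ f →
      loopGen row col dfs g x y is ≠ none := by
  intro is
  induction is with
  | nil => intro g x y _ h; simp [loopGen] at h
  | cons i is' ih =>
    intro g x y hdots h
    simp only [loopGen] at h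
    by_cases hc : pvCanGo row col g (x + pvNx.getD i 0) (y + pvNy.getD i 0) = true
    · rw [if_pos hc] at h
      rcases hdfs : dfs g (x + pvNx.getD i 0) (y + pvNy.getD i 0) with _ | ⟨b1, g1⟩
      · exact H1 _ _ _ (pvCanGo_open _ _ _ _ _ hc) hdots hdfs
      · rw [hdfs] at h
        cases b1 with
        | true => simp at h
        | false =>
          have hg1 : g1 = g := H2 _ _ _ _ (pvCanGo_open _ _ _ _ _ hc) hdfs
          rw [hg1] at h
          exact ih _ _ _ hdots h
    · rw [if_neg hc] at h
      exact ih _ _ _ hdots h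

theorem nd_dfs (row col : Int) :
    ∀ (f : Nat) (g : List (List Char)) (x y : Int),
      (pvGet g x y = '.' ∨ pvGet g x y = '*') → dots g + 1 ≤ f →
      dfsA row col f g x y ≠ none := by
  intro f
  induction f with
  | zero => intro g x y _ hd; omega
  | succ f' ih =>
    intro g x y hd hdots h
    simp only [dfsA] at h
    by_cases hs : pvGet g x y = '*'
    · simp [hs] at h
    · rw [if_neg (by simp [hs])] at h
      have hdot : pvGet g x y = '.' := by tauto
      have hne : (if dfsCountA row col g x y > 1 then '1' else '0') ≠ '.' := by
        split <;> decide
      have hlt := dots_pvSet_lt g x y _ hdot hne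
      exact nd_loop row col f' _ ih (restore_dfs row col f') _ _ _ _ (by omega) h

theorem nd_top (row col : Int) (f : Nat) (g : List (List Char)) (x y : Int)
    (h : dots g + 2 ≤ f) : dfsA row col f g x y ≠ none := by
  cases f with
  | zero => omega
  | succ f' =>
    intro hnone
    simp only [dfsA] at hnone
    by_cases hs : pvGet g x y = '*'
    · simp [hs] at hnone
    · rw [if_neg (by simp [hs])] at hnone
      have hne : (if dfsCountA row col g x y > 1 then '1' else '0') ≠ '.' := by
        split <;> decide
      have hle := dots_pvSet_le g x y _ hne
      exact nd_loop row col f' _ (nd_dfs row col f') (restore_dfs row col f')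
        _ _ _ _ (by omega) hnone

-- ---- the two entry computations agree ----
theorem dc_eq (row col : Int) (g : List (List Char)) (x y : Int) :
    degB row col g x y = dfsCountA row col g x y := by
  simp only [degB, dfsCountA, pvMoves, pvNx, pvNy, List.map, List.sum_cons, List.sum_nil,
    List.foldl, List.getD, List.getElem?_cons_zero, List.getElem?_cons_succ, Option.getD]
  norm_num
  split_ifs <;> norm_num

-- ---- shape preservation ----
theorem shape_loop (row col : Int)
    (dfs : List (List Char) → Int → Int → Option (Bool × List (List Char)))
    (Hdfs : ∀ g x y b g', dfs g x y = some (b, g') → g'.map List.length = g.map List.length) :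
    ∀ (is : List Nat) (g : List (List Char)) (x y : Int) (b : Bool) (g' : List (List Char)),
      loopGen row col dfs g x y is = some (b, g') → g'.map List.length = g.map List.length := by
  intro is
  induction is with
  | nil =>
    intro g x y b g' h
    simp [loopGen] at h
    rw [← h.2, pvSet_mapLen]
  | cons i is' ih =>
    intro g x y b g' h
    simp only [loopGen] at h
    by_cases hc : pvCanGo row col g (x + pvNx.getD i 0) (y + pvNy.getD i 0) = true
    · rw [if_pos hc] at h
      rcases hdfs : dfs g (x + pvNx.getD i 0) (y + pvNy.getD i 0) with _ | ⟨b1, g1⟩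
      · rw [hdfs] at h; simp at h
      · rw [hdfs] at h
        cases b1 with
        | true =>
          simp at h
          rw [← h.2]
          exact Hdfs _ _ _ _ _ hdfs
        | false =>
          exact (ih _ _ _ _ _ h).trans (Hdfs _ _ _ _ _ hdfs)
    · rw [if_neg hc] at h
      exact ih _ _ _ _ _ h

theorem shape_dfs (row col : Int) :
    ∀ (f : Nat) (g : List (List Char)) (x y : Int) (b : Bool) (g' : List (List Char)),
      dfsA row col f g x y = some (b, g') → g'.map List.length = g.map List.length := by
  intro f
  induction f with
  | zero => intro g x y b g' h; simp [dfsA] at h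
  | succ f' ih =>
    intro g x y b g' h
    simp only [dfsA] at h
    by_cases hs : pvGet g x y = '*'
    · rw [if_pos (by simp [hs])] at h
      simp at h
      rw [← h.2]
    · rw [if_neg (by simp [hs])] at h
      exact (shape_loop row col _ ih _ _ _ _ _ _ h).trans (pvSet_mapLen _ _ _ _)

-- ---- simulation: the stack machine runs A's loop ----
def mapMoves (is : List Nat) : List (Int × Int) :=
  is.map (fun i => (pvNx.getD i 0, pvNy.getD i 0))

theorem mapMoves_full : mapMoves [0, 1, 2, 3] = pvMoves := by
  simp [mapMoves, pvNx, pvNy, pvMoves]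

theorem sim (row col : Int) :
    ∀ (f : Nat) (is : List Nat) (g : List (List Char)) (x y : Int)
      (rest : List (Int × Int × List (Int × Int))) (b : Bool) (g' : List (List Char)),
      loopGen row col (fun g2 tx ty => dfsA row col f g2 tx ty) g x y is = some (b, g') →
      ∀ F, ∃ F', F ≤ F' ∧
        machB row col (stepBound f is.length + F) g ((x, y, mapMoves is) :: rest) =
          if b then some (true, g') else machB row col F' g' rest := by
  intro f
  induction f with
  | zero =>
    intro is
    induction is with
    | nil =>
      intro g x y rest b g' h F
      simp only [loopGen] at h
      injection h with h2
      obtain ⟨hb, hg⟩ := Prod.mk.inj h2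
      refine ⟨F, le_refl F, ?_⟩
      have hfe : stepBound 0 0 + F = F + 1 := by simp [stepBound]; omega
      simp only [List.length_nil]
      rw [hfe]
      simp only [mapMoves, List.map_nil, machB]
      rw [← hb, hg]
      simp
    | cons i is' ih =>
      intro g x y rest b g' h F
      simp only [loopGen] at h
      by_cases hc : pvCanGo row col g (x + pvNx.getD i 0) (y + pvNy.getD i 0) = true
      · rw [if_pos hc] at h
        simp [dfsA] at h
      · rw [if_neg hc] at h
        obtain ⟨F', hF', heq⟩ := ih g x y rest b g' h F
        refine ⟨F', hF', ?_⟩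
        have hfe : stepBound 0 (is'.length + 1) + F = (stepBound 0 is'.length + F) + 1 := by
          simp [stepBound, dval]; omega
        simp only [mapMoves, List.map_cons, List.length_cons]
        rw [hfe]
        simp only [machB]
        rw [if_neg hc]
        simpa [mapMoves] using heq
  | succ f₁ ihf =>
    intro is
    induction is with
    | nil =>
      intro g x y rest b g' h F
      simp only [loopGen] at h
      injection h with h2
      obtain ⟨hb, hg⟩ := Prod.mk.inj h2
      refine ⟨F, le_refl F, ?_⟩
      have hfe : stepBound (f₁ + 1) 0 + F = F + 1 := by simp [stepBound]; omega
      simp only [List.length_nil]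
      rw [hfe]
      simp only [mapMoves, List.map_nil, machB]
      rw [← hb, hg]
      simp
    | cons i is' ih =>
      intro g x y rest b g' h F
      simp only [loopGen] at h
      by_cases hc : pvCanGo row col g (x + pvNx.getD i 0) (y + pvNy.getD i 0) = true
      · rw [if_pos hc] at h
        rcases hdfs : dfsA row col (f₁ + 1) g (x + pvNx.getD i 0) (y + pvNy.getD i 0)
          with _ | ⟨b₁, g₁⟩
        · rw [hdfs] at h; simp at h
        · rw [hdfs] at h
          have hfe : stepBound (f₁ + 1) (is'.length + 1) + F =
              (stepBound f₁ 4 + (stepBound (f₁ + 1) is'.length + F)) + 1 := by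
            conv_lhs => rw [show stepBound (f₁ + 1) (is'.length + 1) =
              1 + stepBound f₁ 4 + stepBound (f₁ + 1) is'.length from by
                simp [stepBound, dval]; ring]
            omega
          by_cases hs : pvGet g (x + pvNx.getD i 0) (y + pvNy.getD i 0) = '*'
          · -- the neighbour is the goal: both sides stop at once
            have hsb : (pvGet g (x + pvNx.getD i 0) (y + pvNy.getD i 0) == '*') = true := by
              rw [beq_iff_eq]; exact hs
            have hdfs' : b₁ = true ∧ g₁ = g := by
              simp only [dfsA] at hdfs
              rw [if_pos hsb] at hdfs
              injection hdfs with h2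
              obtain ⟨hb, hg⟩ := Prod.mk.inj h2
              exact ⟨hb.symm, hg.symm⟩
            rw [hdfs'.1] at h
            simp only at h
            injection h with h2
            obtain ⟨hb, hg⟩ := Prod.mk.inj h2
            refine ⟨F, le_refl F, ?_⟩
            simp only [mapMoves, List.map_cons, List.length_cons]
            rw [hfe]
            simp only [machB]
            rw [if_pos hc]
            simp only [enterB]
            rw [if_pos hsb]
            rw [← hb, ← hg, hdfs'.2]
            simp
          · -- the neighbour is a free cell: the machine pushes it, A recurses
            have hsb : ¬((pvGet g (x + pvNx.getD i 0) (y + pvNy.getD i 0) == '*') = true) := by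
              simp only [beq_iff_eq]; exact hs
            have hmark : enterB row col g (x + pvNx.getD i 0) (y + pvNy.getD i 0) =
                (false, pvSet g (x + pvNx.getD i 0) (y + pvNy.getD i 0)
                  (if dfsCountA row col g (x + pvNx.getD i 0) (y + pvNy.getD i 0) > 1
                    then '1' else '0')) := by
              simp only [enterB]
              rw [if_neg hsb, dc_eq]
            have hdfs2 : loopGen row col (fun g2 tx ty => dfsA row col f₁ g2 tx ty)
                (pvSet g (x + pvNx.getD i 0) (y + pvNy.getD i 0)
                  (if dfsCountA row col g (x + pvNx.getD i 0) (y + pvNy.getD i 0) > 1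
                    then '1' else '0'))
                (x + pvNx.getD i 0) (y + pvNy.getD i 0) [0, 1, 2, 3] = some (b₁, g₁) := by
              simp only [dfsA] at hdfs
              rw [if_neg hsb] at hdfs
              exact hdfs
            cases b₁ with
            | true =>
              -- success propagates: the machine halts with (true, g₁)
              simp only at h
              injection h with h2
              obtain ⟨hb, hg⟩ := Prod.mk.inj h2
              obtain ⟨F₁, hF₁, heq₁⟩ := ihf [0, 1, 2, 3] _ _ _
                ((x, y, mapMoves is') :: rest) true g₁ hdfs2
                (stepBound (f₁ + 1) is'.length + F)
              refine ⟨F, le_refl F, ?_⟩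
              simp only [mapMoves, List.map_cons, List.length_cons]
              rw [hfe]
              simp only [machB]
              rw [if_pos hc, hmark]
              simp only
              rw [if_pos rfl] at heq₁
              have h4 : ([0, 1, 2, 3] : List Nat).length = 4 := rfl
              rw [h4, mapMoves_full] at heq₁
              simp only [mapMoves] at heq₁ ⊢
              rw [heq₁, ← hb, hg]
              simp
            | false =>
              obtain ⟨F₁, hF₁, heq₁⟩ := ihf [0, 1, 2, 3] _ _ _
                ((x, y, mapMoves is') :: rest) false g₁ hdfs2
                (stepBound (f₁ + 1) is'.length + F)
              rw [if_neg Bool.false_ne_true] at heq₁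
              obtain ⟨F₂, hle₂, hF₂⟩ : ∃ F₂, F ≤ F₂ ∧
                  F₁ = stepBound (f₁ + 1) is'.length + F₂ :=
                ⟨F₁ - stepBound (f₁ + 1) is'.length, by omega, by omega⟩
              obtain ⟨F', hF', heq₂⟩ := ih g₁ x y rest b g' h F₂
              refine ⟨F', le_trans hle₂ hF', ?_⟩
              have h4 : ([0, 1, 2, 3] : List Nat).length = 4 := rfl
              rw [h4, mapMoves_full] at heq₁
              simp only [mapMoves] at heq₁ heq₂ ⊢
              simp only [List.map_cons, List.length_cons]
              rw [hfe]
              simp only [machB]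
              rw [if_pos hc, hmark]
              simp only
              rw [heq₁, hF₂, heq₂]
      · rw [if_neg hc] at h
        obtain ⟨F', hF', heq⟩ := ih g x y rest b g' h (stepBound f₁ 4 + F)
        refine ⟨F', le_trans (Nat.le_add_left F _) hF', ?_⟩
        have hfe : stepBound (f₁ + 1) (is'.length + 1) + F =
            (stepBound (f₁ + 1) is'.length + (stepBound f₁ 4 + F)) + 1 := by
          conv_lhs => rw [show stepBound (f₁ + 1) (is'.length + 1) =
            1 + stepBound f₁ 4 + stepBound (f₁ + 1) is'.length from by
              simp [stepBound, dval]; ring]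
          omega
        simp only [mapMoves, List.map_cons, List.length_cons]
        rw [hfe]
        simp only [machB]
        rw [if_neg hc]
        simpa [mapMoves] using heq

-- ---- start-cell computation ----
theorem foldl_pick {α : Type} (l : List α) (p : α → Bool) (s : α) :
    l.foldl (fun s x => if p x then x else s) s = (l.filter p).getLastD s := by
  induction l generalizing s with
  | nil => rfl
  | cons a t ih =>
    by_cases h : p a = true
    · simp only [List.foldl_cons, List.filter_cons, h, if_pos, List.getLastD_cons]
      simpa [h] using ih a
    · simp only [List.foldl_cons, List.filter_cons, h]
      simpa [h] using ih s

-- ---- counting '1' cells ----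
theorem foldl_congr_list {α β : Type} (l : List α) (f f' : β → α → β) (a : β)
    (h : ∀ x ∈ l, ∀ acc, f acc x = f' acc x) : l.foldl f a = l.foldl f' a := by
  induction l generalizing a with
  | nil => rfl
  | cons x t ih =>
    simp only [List.foldl_cons]
    rw [h x (by simp), ih _ (fun z hz acc => h z (by simp [hz]) acc)]

theorem count_inner (r : List Char) (c : Nat) (acc : Int) :
    (List.range c).foldl (fun acc j => if r.getD j ' ' == '1' then acc + 1 else acc) acc =
      acc + ((r.take c).count '1' : Nat) := by
  induction c generalizing acc with
  | zero => simp
  | succ c' ih =>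
    rw [List.range_succ, List.foldl_append, ih]
    simp only [List.foldl_cons, List.foldl_nil]
    rcases hrc : r[c']? with _ | a
    · have hd : r.getD c' ' ' = ' ' := by simp [List.getD, hrc]
      have ht : r.take (c' + 1) = r.take c' := by
        have := List.getElem?_eq_none_iff.mp hrc
        rw [List.take_of_length_le (by omega), List.take_of_length_le (by omega)]
      rw [hd, ht]
      norm_num
      decide
    · have hd : r.getD c' ' ' = a := by simp [List.getD, hrc]
      have ht : r.take (c' + 1) = r.take c' ++ [a] := by
        rw [List.take_add_one, hrc]; rfl
      rw [hd, ht, List.count_append]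
      by_cases ha : a = '1'
      · simp [ha]; ring
      · have : (a == '1') = false := by simp [ha]
        simp [this, ha]

theorem count_outer (g : List (List Char)) (c : Nat) :
    (List.range g.length).foldl (fun acc (i : Nat) =>
      (List.range c).foldl (fun acc (j : Nat) =>
        if pvGet g (i : Int) (j : Int) == '1' then acc + 1 else acc) acc) 0 =
      (g.map (fun r => (((r.take c).count '1' : Nat) : Int))).sum := by
  induction g using List.reverseRecOn with
  | nil => simp
  | append_singleton t r ih =>
    rw [List.length_append, List.length_singleton, List.range_succ, List.foldl_append]
    have hstep : ∀ (i : Nat), i < t.length → ∀ (j : Nat),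
        pvGet (t ++ [r]) (i : Int) (j : Int) = pvGet t (i : Int) (j : Int) := by
      intro i hi j
      unfold pvGet
      rw [Int.toNat_natCast, Int.toNat_natCast, List.getD_append _ _ _ _ hi]
    have hcongr : (List.range t.length).foldl (fun acc (i : Nat) =>
        (List.range c).foldl (fun acc (j : Nat) =>
          if pvGet (t ++ [r]) (i : Int) (j : Int) == '1' then acc + 1 else acc) acc) 0 =
        (List.range t.length).foldl (fun acc (i : Nat) =>
        (List.range c).foldl (fun acc (j : Nat) =>
          if pvGet t (i : Int) (j : Int) == '1' then acc + 1 else acc) acc) (0 : Int) := by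
      apply foldl_congr_list
      intro i hi acc
      apply foldl_congr_list
      intro j _ acc2
      rw [hstep i (List.mem_range.mp hi) j]
    rw [hcongr, ih]
    have hlast : ∀ (j : Nat), pvGet (t ++ [r]) (t.length : Int) (j : Int) = r.getD j ' ' := by
      intro j
      unfold pvGet
      rw [Int.toNat_natCast, Int.toNat_natCast, List.getD_append_right _ _ _ _ (le_refl _)]
      simp
    have hfold : ∀ (A : Int), (List.range c).foldl (fun acc (j : Nat) =>
        if pvGet (t ++ [r]) (t.length : Int) (j : Int) == '1' then acc + 1 else acc) A =
        A + ((r.take c).count '1' : Nat) := by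
      intro A
      rw [foldl_congr_list _ _ (fun acc j => if r.getD j ' ' == '1' then acc + 1 else acc) _
        (by intro j _ acc; rw [hlast j])]
      exact count_inner r c A
    simp only [List.foldl_cons, List.foldl_nil]
    rw [hfold]
    simp

-- ---- unfolding helpers (definitional) ----
theorem dfsA_succ (row col : Int) (f : Nat) (g : List (List Char)) (x y : Int) :
    dfsA row col (f + 1) g x y =
      if pvGet g x y == '*' then some (true, g)
      else
        loopGen row col (fun g' tx ty => dfsA row col f g' tx ty)
          (pvSet g x y (if dfsCountA row col g x y > 1 then '1' else '0')) x y [0, 1, 2, 3] := rfl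

theorem machB_nil (row col : Int) (f : Nat) (g : List (List Char)) :
    machB row col (f + 1) g [] = some (false, g) := rfl

-- ---- the two searches leave the same grid ----
theorem shape_res (row col : Int) (g0 : List (List Char)) (sx sy : Int) (T : Nat) :
    (resGrid (dfsA row col T g0 sx sy) g0).map List.length = g0.map List.length := by
  rcases h : dfsA row col T g0 sx sy with _ | ⟨b, g'⟩
  · simp [resGrid]
  · simpa [resGrid] using shape_dfs row col T g0 sx sy b g' h

theorem grids_eq (row col : Int) (g0 : List (List Char)) (sx sy : Int) :
    resGrid (dfsA row col ((g0.map List.length).sum + 2) g0 sx sy) g0 =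
    (if (enterB row col g0 sx sy).1 then g0
     else
       resGrid (machB row col (stepBound ((g0.map List.length).sum + 1) 4 + 1)
         (enterB row col g0 sx sy).2 [(sx, sy, pvMoves)]) (enterB row col g0 sx sy).2) := by
  by_cases hs : pvGet g0 sx sy = '*'
  · have hsb : (pvGet g0 sx sy == '*') = true := by rw [beq_iff_eq]; exact hs
    have hA : dfsA row col ((g0.map List.length).sum + 1 + 1) g0 sx sy = some (true, g0) := by
      rw [dfsA_succ, if_pos hsb]
    have hB : enterB row col g0 sx sy = (true, g0) := by
      simp only [enterB]; rw [if_pos hsb]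
    rw [show (g0.map List.length).sum + 2 = (g0.map List.length).sum + 1 + 1 from rfl]
    simp [hA, hB, resGrid]
  · have hsb : ¬((pvGet g0 sx sy == '*') = true) := by simp only [beq_iff_eq]; exact hs
    have hA : dfsA row col ((g0.map List.length).sum + 1 + 1) g0 sx sy =
        loopGen row col (fun g' tx ty => dfsA row col ((g0.map List.length).sum + 1) g' tx ty)
          (pvSet g0 sx sy (if dfsCountA row col g0 sx sy > 1 then '1' else '0'))
          sx sy [0, 1, 2, 3] := by
      rw [dfsA_succ, if_neg hsb]
    have hB : enterB row col g0 sx sy =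
        (false, pvSet g0 sx sy (if dfsCountA row col g0 sx sy > 1 then '1' else '0')) := by
      simp only [enterB]; rw [if_neg hsb, dc_eq]
    have hnd : dfsA row col ((g0.map List.length).sum + 2) g0 sx sy ≠ none :=
      nd_top row col _ g0 sx sy (by have := dots_le_total g0; omega)
    rcases hres : loopGen row col
        (fun g' tx ty => dfsA row col ((g0.map List.length).sum + 1) g' tx ty)
        (pvSet g0 sx sy (if dfsCountA row col g0 sx sy > 1 then '1' else '0'))
        sx sy [0, 1, 2, 3] with _ | ⟨b, g'⟩
    · exact absurd (by rw [show (g0.map List.length).sum + 2 =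
        (g0.map List.length).sum + 1 + 1 from rfl, hA, hres]) hnd
    · obtain ⟨F', hF', heq⟩ := sim row col ((g0.map List.length).sum + 1) [0, 1, 2, 3]
        (pvSet g0 sx sy (if dfsCountA row col g0 sx sy > 1 then '1' else '0'))
        sx sy [] b g' hres 1
      have h4 : ([0, 1, 2, 3] : List Nat).length = 4 := rfl
      rw [h4, mapMoves_full] at heq
      rw [show (g0.map List.length).sum + 2 = (g0.map List.length).sum + 1 + 1 from rfl,
        hA, hres, hB]
      cases b with
      | true =>
        rw [if_pos rfl] at heq
        simp [heq, resGrid]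
      | false =>
        rw [if_neg Bool.false_ne_true] at heq
        obtain ⟨F'', rfl⟩ : ∃ F'', F' = F'' + 1 := ⟨F' - 1, by omega⟩
        simp [heq, machB_nil, resGrid]

-- ---- start-cell folds agree ----
theorem foldl_flatMap' {α β γ : Type} (l : List α) (h : α → List β) (f : γ → β → γ) (a : γ) :
    (l.flatMap h).foldl f a = l.foldl (fun s x => (h x).foldl f s) a := by
  induction l generalizing a with
  | nil => rfl
  | cons x t ih => simp only [List.flatMap_cons, List.foldl_append, List.foldl_cons, ih]

theorem start_eq (g0 : List (List Char)) (n c : Nat) :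
    (List.range n).foldl (fun s (i : Nat) =>
      (List.range c).foldl (fun s (j : Nat) =>
        if pvGet g0 (i : Int) (j : Int) == 'M' then ((i : Int), (j : Int)) else s) s)
      ((0 : Int), (0 : Int)) =
    (((List.range n).flatMap (fun (i : Nat) =>
        (List.range c).map (fun (j : Nat) => ((i : Int), (j : Int))))).filter
      (fun p => pvGet g0 p.1 p.2 == 'M')).getLastD ((0 : Int), (0 : Int)) := by
  rw [← foldl_pick, foldl_flatMap']
  apply foldl_congr_list
  intro i _ acc
  rw [List.foldl_map]

theorem len_of_mapLen {g h : List (List Char)} (e : g.map List.length = h.map List.length) :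
    g.length = h.length := by
  have := congrArg List.length e
  simpa using this

theorem counts_eq (G : List (List Char)) (n c : Nat) (hn : G.length = n) (k : Int) :
    (if (List.range n).foldl (fun acc (i : Nat) =>
        (List.range c).foldl (fun acc (j : Nat) =>
          if pvGet G (i : Int) (j : Int) == '1' then acc + 1 else acc) acc) 0 = k
      then "Impressed" else "Oops!") =
    (if (G.map (fun r => (((r.take c).count '1' : Nat) : Int))).sum = k
      then "Impressed" else "Oops!") := by
  rw [← hn, count_outer]

-- ===== VERDICT (by name: the statement is the Claim_ definition above) =====
theorem countLuck_spec : Claim_equal_countLuck := by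
  intro matrix k _ _
  unfold Spec_countLuck
  simp only [countLuck, countLuck_alt]
  rw [start_eq (matrix.map String.toList) matrix.length ((matrix.headD "").length : Int).toNat]
  rw [grids_eq (matrix.length : Int) ((matrix.headD "").length : Int) (matrix.map String.toList)]
  apply counts_eq
  rw [← grids_eq (matrix.length : Int) ((matrix.headD "").length : Int) (matrix.map String.toList)]
  exact (len_of_mapLen (shape_res _ _ _ _ _ _)).trans (by simp)
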